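-- pv_equiv track=rewrite | github.com/LleilaA13/Python-practice | exercise18/solution.py | es62
-- ===== SOURCE A (Python) =====
-- def es62(matrix):
--     imax = jmax = 0
--     for j in range(len(matrix[0])):
--         for i in range(len(matrix)):
--             if matrix[i][j] >= matrix[imax][jmax]:
--                 imax = i
--                 jmax = j
--     imin = jmin = 0
--     for j in range(len(matrix[0])):
--         for i in range(len(matrix)):
--             if matrix[i][j] < matrix[imin][jmin]:
--                 imin = i
--                 jmin = j
--     m1 = [[matrix[i][j]
--            for j in range(len(matrix[0]))] for i in range(len(matrix))]
--     for j in range(len(matrix[0])):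
--         m1[imin][j] = matrix[imax][j]
--         m1[imax][j] = matrix[imin][j]
--     for i in range(len(matrix)):
--         m1[i][jmin], m1[i][jmax] = m1[i][jmax], m1[i][jmin]
--     return m1
-- ===== SOURCE B (Python) =====
-- def es62(matrix):
--     rows, cols = len(matrix), len(matrix[0])
--     # column-major flattening keyed by (value, position): Python's lexicographic
--     # max picks the LAST maximal cell (A's >= tie-break), min the FIRST minimal one.
--     keyed = [(matrix[i][j], j * rows + i) for j in range(cols) for i in range(rows)]
--     _, kmax = max(keyed)
--     _, kmin = min(keyed)
--     imax, jmax = kmax % rows, kmax // rows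
--     imin, jmin = kmin % rows, kmin // rows
--     m = [row[:cols] for row in matrix]
--     m[imax], m[imin] = m[imin], m[imax]
--     t = [list(col) for col in zip(*m)]
--     t[jmax], t[jmin] = t[jmin], t[jmax]
--     return [list(row) for row in zip(*t)]
-- ===== Notes on version B (the rewrite author's own statement) =====
-- stated objective: alternative
-- what changed: B replaces A's nested comparison scans by a single flattened column-major list keyed with (value, position) whose built-in lexicographic max/min reproduce A's tie-breaking, and replaces A's in-place row-swap and column-swap loops by one slice-copy row swap followed by a transpose / row-swap / transpose-back for the column swap.
import Mathlib
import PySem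

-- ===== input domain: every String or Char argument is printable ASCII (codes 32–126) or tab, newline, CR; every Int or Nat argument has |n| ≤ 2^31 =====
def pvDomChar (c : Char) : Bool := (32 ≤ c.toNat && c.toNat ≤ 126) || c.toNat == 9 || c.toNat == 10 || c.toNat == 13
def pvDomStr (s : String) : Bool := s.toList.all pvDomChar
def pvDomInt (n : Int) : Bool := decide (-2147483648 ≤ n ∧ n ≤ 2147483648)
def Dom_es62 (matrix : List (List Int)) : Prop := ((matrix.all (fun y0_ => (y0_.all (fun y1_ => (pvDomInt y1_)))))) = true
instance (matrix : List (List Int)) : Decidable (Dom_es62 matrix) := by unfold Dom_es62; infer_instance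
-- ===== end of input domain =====

-- B replaces A's nested comparison scans by built-in lexicographic max/min over one
-- (value, position)-keyed column-major flattening, and A's in-place swap loops by a
-- slice-copy row swap plus transpose / row-swap / transpose-back (objective: alternative).
-- All Python indices here are nonnegative (from range(...) or arithmetic on such),
-- so indexing is ported with Nat getD, exact under Pre_ (in range).

-- ===== PORT A =====
-- matrix[i][j] (indices known nonnegative and in range under Pre_)
def cellA (m : List (List Int)) (i j : Nat) : Int := (m.getD i []).getD j 0
-- m[i][j] = v  (in range under Pre_)
def setCellA (m : List (List Int)) (i j : Nat) (v : Int) : List (List Int) :=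
  m.set i ((m.getD i []).set j v)

def es62 (matrix : List (List Int)) : List (List Int) :=
  let rows := matrix.length
  let cols := (matrix.getD 0 []).length
  -- first scan: imax, jmax (column-major, >=)
  let pmax := (List.range cols).foldl (fun p j =>
      (List.range rows).foldl (fun q i =>
        if cellA matrix i j ≥ cellA matrix q.1 q.2 then (i, j) else q) p) (0, 0)
  -- second scan: imin, jmin (column-major, <)
  let pmin := (List.range cols).foldl (fun p j =>
      (List.range rows).foldl (fun q i =>
        if cellA matrix i j < cellA matrix q.1 q.2 then (i, j) else q) p) (0, 0)
  -- m1 = element-wise copy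
  let m1 := (List.range rows).map (fun i => (List.range cols).map (fun j => cellA matrix i j))
  -- row swap: m1[imin][j] = matrix[imax][j]; m1[imax][j] = matrix[imin][j]
  let m2 := (List.range cols).foldl (fun m j =>
      setCellA (setCellA m pmin.1 j (cellA matrix pmax.1 j)) pmax.1 j (cellA matrix pmin.1 j)) m1
  -- column swap: m1[i][jmin], m1[i][jmax] = m1[i][jmax], m1[i][jmin]
  (List.range rows).foldl (fun m i =>
      let a := cellA m i pmax.2
      let b := cellA m i pmin.2
      setCellA (setCellA m i pmin.2 a) i pmax.2 b) m2

-- ===== PORT B =====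
-- matrix[i][j] (B's accessor; exact under Pre_)
def cellB (m : List (List Int)) (i j : Nat) : Int := (m.getD i []).getD j 0
-- Python's lexicographic > and < on (int, nonnegative-index) pairs
def pairGtB (a b : Int × Nat) : Bool := a.1 > b.1 || (a.1 == b.1 && b.2 < a.2)
def pairLtB (a b : Int × Nat) : Bool := a.1 < b.1 || (a.1 == b.1 && a.2 < b.2)
-- builtin max(l) / min(l) on a nonempty list: start from the head, keep the first extremum
def pyMaxB (l : List (Int × Nat)) : Int × Nat :=
  match l with
  | [] => (0, 0)
  | x :: xs => xs.foldl (fun best y => if pairGtB y best then y else best) x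
def pyMinB (l : List (Int × Nat)) : Int × Nat :=
  match l with
  | [] => (0, 0)
  | x :: xs => xs.foldl (fun best y => if pairLtB y best then y else best) x
-- Python's  m[a], m[b] = m[b], m[a]
def swap2 (m : List (List Int)) (a b : Nat) : List (List Int) :=
  (m.set a (m.getD b [])).set b (m.getD a [])

def es62_alt (matrix : List (List Int)) : List (List Int) :=
  let rows := matrix.length
  let cols := (matrix.getD 0 []).length
  -- keyed column-major flattening: [(matrix[i][j], j*rows+i) for j ... for i ...]
  let keyed := (List.range cols).flatMap (fun j =>
      (List.range rows).map (fun i => (cellB matrix i j, j * rows + i)))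
  let kmax := (pyMaxB keyed).2
  let kmin := (pyMinB keyed).2
  let imax := kmax % rows
  let jmax := kmax / rows
  let imin := kmin % rows
  let jmin := kmin / rows
  -- m = [row[:cols] for row in matrix], then swap rows imax/imin
  let m := matrix.map (fun row => row.take cols)
  let m2 := swap2 m imax imin
  -- zip(*m2): under Pre_ every row of m2 has exactly cols entries, so cols tuples
  let t := (List.range cols).map (fun j => m2.map (fun row => row.getD j 0))
  let t2 := swap2 t jmax jmin
  -- zip(*t2): t2 has cols columns of rows entries each, so rows tuples
  (List.range rows).map (fun i => t2.map (fun col => col.getD i 0))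

-- ===== PRECONDITION & SPEC =====
-- Pre_ excludes exactly the inputs where A raises IndexError: the empty matrix
-- (matrix[0]), an empty first row (m1[i][0] in the column-swap loop), and rows
-- shorter than the first row (matrix[i][j] while scanning).
def Pre_es62 (matrix : List (List Int)) : Prop :=
  matrix ≠ [] ∧ 0 < (matrix.getD 0 []).length ∧
    ∀ r ∈ matrix, (matrix.getD 0 []).length ≤ r.length
instance (matrix : List (List Int)) : Decidable (Pre_es62 matrix) := by
  unfold Pre_es62; infer_instance
def pvWitness_es62 : List (List Int) := [[1, 7], [4, 0]]

def Spec_es62 (matrix : List (List Int)) (out : List (List Int)) : Prop := out = es62_alt matrix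
instance (matrix : List (List Int)) (out : List (List Int)) : Decidable (Spec_es62 matrix out) := by unfold Spec_es62; infer_instance

-- ===== CLAIM (what is proved, stated in full; the proofs are below) =====
def Claim_equal_es62 : Prop := ∀ (matrix : List (List Int)), Dom_es62 matrix → Pre_es62 matrix → Spec_es62 matrix (es62 matrix)

-- ===== LEMMAS AND PROOFS =====

theorem foldl_invariant {α β : Type} {P : α → Prop} {f : α → β → α} :
    ∀ (l : List β) (a : α), P a → (∀ a b, b ∈ l → P a → P (f a b)) → P (l.foldl f a) := by
  intro l
  induction l with
  | nil => intro a h _; exact h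
  | cons x xs ih =>
      intro a h hs
      exact ih _ (hs a x (by simp) h) (fun a b hb => hs a b (by simp [hb]))

-- ---- proof-only helper definitions ----
def rowsOf (mat : List (List Int)) : Nat := mat.length
def colsOf (mat : List (List Int)) : Nat := (mat.getD 0 []).length

def scanMax (mat : List (List Int)) : Nat × Nat :=
  (List.range (colsOf mat)).foldl (fun p j =>
    (List.range (rowsOf mat)).foldl (fun q i =>
      if cellA mat i j ≥ cellA mat q.1 q.2 then (i, j) else q) p) (0, 0)

def scanMin (mat : List (List Int)) : Nat × Nat :=
  (List.range (colsOf mat)).foldl (fun p j =>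
    (List.range (rowsOf mat)).foldl (fun q i =>
      if cellA mat i j < cellA mat q.1 q.2 then (i, j) else q) p) (0, 0)

def copyM (mat : List (List Int)) : List (List Int) :=
  (List.range (rowsOf mat)).map (fun i => (List.range (colsOf mat)).map (fun j => cellA mat i j))

def rowSwapStep (mat : List (List Int)) (imax imin : Nat) (m : List (List Int)) (j : Nat) : List (List Int) :=
  setCellA (setCellA m imin j (cellA mat imax j)) imax j (cellA mat imin j)

def colSwapStep (jmax jmin : Nat) (m : List (List Int)) (i : Nat) : List (List Int) :=
  setCellA (setCellA m i jmin (cellA m i jmax)) i jmax (cellA m i jmin)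

def rswap (imax imin i : Nat) : Nat := if i = imin then imax else if i = imax then imin else i

-- the common reference value: the matrix rebuilt through row/column index swaps
def remapM (mat : List (List Int)) (pmax pmin : Nat × Nat) : List (List Int) :=
  (List.range (rowsOf mat)).map (fun i => (List.range (colsOf mat)).map (fun j =>
    cellA mat (rswap pmax.1 pmin.1 i) (rswap pmax.2 pmin.2 j)))

theorem es62_eq (mat : List (List Int)) :
    es62 mat = (List.range (rowsOf mat)).foldl
      (colSwapStep (scanMax mat).2 (scanMin mat).2)
      ((List.range (colsOf mat)).foldl (rowSwapStep mat (scanMax mat).1 (scanMin mat).1) (copyM mat)) := rfl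

theorem scan_bounds (mat : List (List Int)) (hr : 0 < rowsOf mat) (hc : 0 < colsOf mat) :
    (scanMax mat).1 < rowsOf mat ∧ (scanMax mat).2 < colsOf mat ∧
    (scanMin mat).1 < rowsOf mat ∧ (scanMin mat).2 < colsOf mat := by
  have hmax : ((scanMax mat).1 < rowsOf mat ∧ (scanMax mat).2 < colsOf mat) := by
    unfold scanMax
    refine foldl_invariant (P := fun q : Nat × Nat => q.1 < rowsOf mat ∧ q.2 < colsOf mat)
      _ _ ⟨hr, hc⟩ ?_
    intro p j hj hp
    refine foldl_invariant (P := fun q : Nat × Nat => q.1 < rowsOf mat ∧ q.2 < colsOf mat)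
      _ _ hp ?_
    intro q i hi hq
    split
    · exact ⟨List.mem_range.mp hi, List.mem_range.mp hj⟩
    · exact hq
  have hmin : ((scanMin mat).1 < rowsOf mat ∧ (scanMin mat).2 < colsOf mat) := by
    unfold scanMin
    refine foldl_invariant (P := fun q : Nat × Nat => q.1 < rowsOf mat ∧ q.2 < colsOf mat)
      _ _ ⟨hr, hc⟩ ?_
    intro p j hj hp
    refine foldl_invariant (P := fun q : Nat × Nat => q.1 < rowsOf mat ∧ q.2 < colsOf mat)
      _ _ hp ?_
    intro q i hi hq
    split
    · exact ⟨List.mem_range.mp hi, List.mem_range.mp hj⟩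
    · exact hq
  exact ⟨hmax.1, hmax.2, hmin.1, hmin.2⟩

-- basic facts about setCellA / copyM
theorem getD_set' {α : Type} (l : List α) (j : Nat) (v : α) (hj : j < l.length) (c : Nat) (d : α) :
    (l.set j v).getD c d = if c = j then v else l.getD c d := by
  rw [List.getD_eq_getElem?_getD, List.getD_eq_getElem?_getD, List.getElem?_set]
  by_cases h : c = j
  · subst h; simp [hj]
  · simp [h, Ne.symm h]

theorem row_setCellA (m : List (List Int)) (i j : Nat) (v : Int) (r : Nat) :
    (setCellA m i j v).getD r [] =
      if r = i ∧ i < m.length then (m.getD i []).set j v else m.getD r [] := by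
  unfold setCellA
  rw [List.getD_eq_getElem?_getD, List.getD_eq_getElem?_getD, List.getElem?_set]
  by_cases h1 : r = i
  · subst h1
    by_cases h2 : r < m.length
    · simp [h2]
    · simp [h2, List.getD_eq_getElem?_getD]
  · simp [h1, Ne.symm h1, List.getD_eq_getElem?_getD]

theorem length_setCellA (m : List (List Int)) (i j : Nat) (v : Int) :
    (setCellA m i j v).length = m.length := by simp [setCellA]

theorem rowlen_setCellA (m : List (List Int)) (i j : Nat) (v : Int) (r : Nat) :
    ((setCellA m i j v).getD r []).length = (m.getD r []).length := by
  rw [row_setCellA]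
  by_cases h : r = i ∧ i < m.length
  · rw [if_pos h]; simp [h.1]
  · rw [if_neg h]

theorem cellA_setCellA (m : List (List Int)) (i j : Nat) (v : Int)
    (hi : i < m.length) (hj : j < (m.getD i []).length) (r c : Nat) :
    cellA (setCellA m i j v) r c = if r = i ∧ c = j then v else cellA m r c := by
  unfold cellA
  rw [row_setCellA]
  by_cases hr : r = i
  · subst hr
    rw [if_pos ⟨rfl, hi⟩, getD_set' _ _ _ hj]
    by_cases hc : c = j
    · simp [hc]
    · simp [hc]
  · rw [if_neg (by simp [hr])]
    simp [hr]

theorem length_copyM (mat : List (List Int)) : (copyM mat).length = rowsOf mat := by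
  simp [copyM]

theorem row_copyM (mat : List (List Int)) (i : Nat) (hi : i < rowsOf mat) :
    (copyM mat).getD i [] = (List.range (colsOf mat)).map (fun j => cellA mat i j) := by
  unfold copyM
  rw [List.getD_eq_getElem _ _ (by simpa using hi)]
  simp

theorem rowlen_copyM (mat : List (List Int)) (i : Nat) (hi : i < rowsOf mat) :
    ((copyM mat).getD i []).length = colsOf mat := by
  rw [row_copyM mat i hi]; simp

theorem cellA_copyM (mat : List (List Int)) (i j : Nat) (hi : i < rowsOf mat) (hj : j < colsOf mat) :
    cellA (copyM mat) i j = cellA mat i j := by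
  simp only [cellA]
  rw [row_copyM mat i hi, List.getD_eq_getElem _ _ (by simpa using hj)]
  simp [cellA]

theorem rswap_lt (a b c n : Nat) (ha : a < n) (hb : b < n) (hc : c < n) : rswap a b c < n := by
  unfold rswap; split_ifs <;> assumption

-- row-swap loop characterization
theorem rowSwap_prefix (mat : List (List Int)) (imax imin : Nat)
    (himax : imax < rowsOf mat) (himin : imin < rowsOf mat) :
    ∀ (k : Nat), k ≤ colsOf mat →
      ((List.range k).foldl (rowSwapStep mat imax imin) (copyM mat)).length = rowsOf mat ∧
      (∀ r, (((List.range k).foldl (rowSwapStep mat imax imin) (copyM mat)).getD r []).length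
        = ((copyM mat).getD r []).length) ∧
      (∀ r, r < rowsOf mat → ∀ c, c < colsOf mat →
        cellA ((List.range k).foldl (rowSwapStep mat imax imin) (copyM mat)) r c
          = if c < k then cellA mat (rswap imax imin r) c else cellA mat r c) := by
  intro k
  induction k with
  | zero =>
    intro _
    refine ⟨length_copyM mat, fun r => rfl, ?_⟩
    intro r hr c hc
    simp [cellA_copyM mat r c hr hc]
  | succ k ih =>
    intro hk
    obtain ⟨hlen, hrowlen, hcell⟩ := ih (Nat.le_of_succ_le hk)
    have hkc : k < colsOf mat := hk
    rw [List.range_succ, List.foldl_append, List.foldl_cons, List.foldl_nil]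
    have h1 : imin < ((List.range k).foldl (rowSwapStep mat imax imin) (copyM mat)).length := by
      rw [hlen]; exact himin
    have h2 : k < (((List.range k).foldl (rowSwapStep mat imax imin) (copyM mat)).getD imin []).length := by
      rw [hrowlen imin, rowlen_copyM mat imin himin]; exact hkc
    have h3 : imax < (setCellA ((List.range k).foldl (rowSwapStep mat imax imin) (copyM mat)) imin k
        (cellA mat imax k)).length := by
      rw [length_setCellA, hlen]; exact himax
    have h4 : k < ((setCellA ((List.range k).foldl (rowSwapStep mat imax imin) (copyM mat)) imin k
        (cellA mat imax k)).getD imax []).length := by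
      rw [rowlen_setCellA, hrowlen imax, rowlen_copyM mat imax himax]; exact hkc
    refine ⟨?_, ?_, ?_⟩
    · rw [rowSwapStep, length_setCellA, length_setCellA, hlen]
    · intro r
      rw [rowSwapStep, rowlen_setCellA, rowlen_setCellA, hrowlen r]
    · intro r hr c hc
      rw [rowSwapStep, cellA_setCellA _ _ _ _ h3 h4, cellA_setCellA _ _ _ _ h1 h2,
        hcell r hr c hc]
      by_cases hck : c = k
      · by_cases hra : r = imax
        · rw [if_pos ⟨hra, hck⟩, if_pos (by omega : c < k + 1), hck]
          unfold rswap
          by_cases he : r = imin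
          · rw [if_pos he, hra.symm.trans he]
          · rw [if_neg he, if_pos hra]
        · rw [if_neg (by simp [hra])]
          by_cases hrn : r = imin
          · rw [if_pos ⟨hrn, hck⟩, if_pos (by omega : c < k + 1), hck]
            unfold rswap
            rw [if_pos hrn]
          · rw [if_neg (by simp [hrn]), if_neg (by omega : ¬ c < k),
              if_pos (by omega : c < k + 1)]
            unfold rswap
            rw [if_neg hrn, if_neg hra]
      · rw [if_neg (by simp [hck]), if_neg (by simp [hck])]
        by_cases hlt : c < k
        · rw [if_pos hlt, if_pos (by omega)]
        · rw [if_neg hlt, if_neg (by omega)]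

-- column-swap loop characterization
theorem colSwap_prefix (jmax jmin : Nat) (m0 : List (List Int)) (rows cols : Nat)
    (hjmax : jmax < cols) (hjmin : jmin < cols) (hlen : m0.length = rows)
    (hrowlen : ∀ r, r < rows → (m0.getD r []).length = cols) :
    ∀ (k : Nat), k ≤ rows →
      ((List.range k).foldl (colSwapStep jmax jmin) m0).length = rows ∧
      (∀ r, (((List.range k).foldl (colSwapStep jmax jmin) m0).getD r []).length
        = (m0.getD r []).length) ∧
      (∀ r, r < rows → ∀ c, c < cols →
        cellA ((List.range k).foldl (colSwapStep jmax jmin) m0) r c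
          = if r < k then cellA m0 r (rswap jmax jmin c) else cellA m0 r c) := by
  intro k
  induction k with
  | zero =>
    intro _
    exact ⟨hlen, fun r => rfl, fun r hr c hc => by simp⟩
  | succ k ih =>
    intro hk
    obtain ⟨hl, hrl, hcell⟩ := ih (Nat.le_of_succ_le hk)
    have hkr : k < rows := hk
    rw [List.range_succ, List.foldl_append, List.foldl_cons, List.foldl_nil]
    have h1 : k < ((List.range k).foldl (colSwapStep jmax jmin) m0).length := by
      rw [hl]; exact hkr
    have h2 : jmin < (((List.range k).foldl (colSwapStep jmax jmin) m0).getD k []).length := by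
      rw [hrl k, hrowlen k hkr]; exact hjmin
    have h3 : k < (setCellA ((List.range k).foldl (colSwapStep jmax jmin) m0) k jmin
        (cellA ((List.range k).foldl (colSwapStep jmax jmin) m0) k jmax)).length := by
      rw [length_setCellA, hl]; exact hkr
    have h4 : jmax < ((setCellA ((List.range k).foldl (colSwapStep jmax jmin) m0) k jmin
        (cellA ((List.range k).foldl (colSwapStep jmax jmin) m0) k jmax)).getD k []).length := by
      rw [rowlen_setCellA, hrl k, hrowlen k hkr]; exact hjmax
    have hreadmax : cellA ((List.range k).foldl (colSwapStep jmax jmin) m0) k jmax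
        = cellA m0 k jmax := by
      rw [hcell k hkr jmax hjmax, if_neg (Nat.lt_irrefl k)]
    have hreadmin : cellA ((List.range k).foldl (colSwapStep jmax jmin) m0) k jmin
        = cellA m0 k jmin := by
      rw [hcell k hkr jmin hjmin, if_neg (Nat.lt_irrefl k)]
    refine ⟨?_, ?_, ?_⟩
    · rw [colSwapStep, length_setCellA, length_setCellA, hl]
    · intro r
      rw [colSwapStep, rowlen_setCellA, rowlen_setCellA, hrl r]
    · intro r hr c hc
      rw [colSwapStep, cellA_setCellA _ _ _ _ h3 h4, cellA_setCellA _ _ _ _ h1 h2,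
        hcell r hr c hc, hreadmax, hreadmin]
      by_cases hrk : r = k
      · by_cases hcx : c = jmax
        · rw [if_pos ⟨hrk, hcx⟩, if_pos (by omega : r < k + 1), hrk, hcx]
          unfold rswap
          by_cases he : jmax = jmin
          · rw [if_pos he, ← he]
          · rw [if_neg he, if_pos rfl]
        · rw [if_neg (by simp [hcx])]
          by_cases hcn : c = jmin
          · rw [if_pos ⟨hrk, hcn⟩, if_pos (by omega : r < k + 1), hrk, hcn]
            unfold rswap
            rw [if_pos rfl]
          · rw [if_neg (by simp [hcn]), if_neg (by omega : ¬ r < k),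
              if_pos (by omega : r < k + 1)]
            unfold rswap
            rw [if_neg hcn, if_neg hcx]
      · rw [if_neg (by simp [hrk]), if_neg (by simp [hrk])]
        by_cases hlt : r < k
        · rw [if_pos hlt, if_pos (by omega)]
        · rw [if_neg hlt, if_neg (by omega)]

theorem pre_facts (matrix : List (List Int)) (h : Pre_es62 matrix) :
    0 < rowsOf matrix ∧ 0 < colsOf matrix ∧
      ∀ i, i < rowsOf matrix → colsOf matrix ≤ (matrix.getD i []).length := by
  obtain ⟨hne, hc, hrect⟩ := h
  refine ⟨by simpa [rowsOf] using List.length_pos_iff.mpr hne, hc, ?_⟩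
  intro i hi
  exact hrect _ (by
    rw [List.getD_eq_getElem _ _ hi]
    exact List.getElem_mem hi)

-- A's result, characterized: the remapped matrix at A's scan indices
theorem es62_eq_remap (matrix : List (List Int)) (hrpos : 0 < rowsOf matrix)
    (hcpos : 0 < colsOf matrix) :
    es62 matrix = remapM matrix (scanMax matrix) (scanMin matrix) := by
  obtain ⟨hi1, hj1, hi2, hj2⟩ := scan_bounds matrix hrpos hcpos
  obtain ⟨hLen2, hRow2, hCell2⟩ :=
    rowSwap_prefix matrix (scanMax matrix).1 (scanMin matrix).1 hi1 hi2 (colsOf matrix) le_rfl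
  obtain ⟨hLen3, hRow3, hCell3⟩ :=
    colSwap_prefix (scanMax matrix).2 (scanMin matrix).2
      ((List.range (colsOf matrix)).foldl
        (rowSwapStep matrix (scanMax matrix).1 (scanMin matrix).1) (copyM matrix))
      (rowsOf matrix) (colsOf matrix) hj1 hj2 hLen2
      (fun r hr => by rw [hRow2 r, rowlen_copyM matrix r hr])
      (rowsOf matrix) le_rfl
  rw [es62_eq]
  unfold remapM
  apply List.ext_getElem
  · rw [hLen3]; simp
  · intro i hI hI'
    have hi : i < rowsOf matrix := by rwa [hLen3] at hI
    have hrow3len : (((List.range (rowsOf matrix)).foldl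
        (colSwapStep (scanMax matrix).2 (scanMin matrix).2)
        ((List.range (colsOf matrix)).foldl
          (rowSwapStep matrix (scanMax matrix).1 (scanMin matrix).1) (copyM matrix))).getD i []).length
        = colsOf matrix := by
      rw [hRow3 i, hRow2 i, rowlen_copyM matrix i hi]
    rw [List.getElem_map, List.getElem_range]
    apply List.ext_getElem
    · rw [← List.getD_eq_getElem _ ([] : List Int) hI, hrow3len]; simp
    · intro j hJ hJ'
      have hj : j < colsOf matrix := by
        rw [← List.getD_eq_getElem _ ([] : List Int) hI, hrow3len] at hJ
        exact hJ
      rw [List.getElem_map, List.getElem_range]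
      have hcswaplt : rswap (scanMax matrix).2 (scanMin matrix).2 j < colsOf matrix :=
        rswap_lt _ _ _ _ hj1 hj2 hj
      have step3 := hCell3 i hi j hj
      rw [if_pos hi] at step3
      have step2 := hCell2 i hi (rswap (scanMax matrix).2 (scanMin matrix).2 j) hcswaplt
      rw [if_pos hcswaplt] at step2
      have : cellA ((List.range (rowsOf matrix)).foldl
          (colSwapStep (scanMax matrix).2 (scanMin matrix).2)
          ((List.range (colsOf matrix)).foldl
            (rowSwapStep matrix (scanMax matrix).1 (scanMin matrix).1) (copyM matrix))) i j
          = cellA matrix (rswap (scanMax matrix).1 (scanMin matrix).1 i)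
              (rswap (scanMax matrix).2 (scanMin matrix).2 j) := by
        rw [step3, step2]
      rw [← this]
      rw [cellA, List.getD_eq_getElem _ ([] : List Int) hI, List.getD_eq_getElem _ (0 : Int) hJ]

-- ---- B-side lemmas: the keyed lexicographic scan computes A's scan indices ----

theorem foldl_flatMap' {α β γ : Type} (f : β → List γ) (g : α → γ → α) :
    ∀ (l : List β) (a : α), (l.flatMap f).foldl g a = l.foldl (fun a x => (f x).foldl g a) a := by
  intro l
  induction l with
  | nil => intro a; rfl
  | cons x xs ih => intro a; simp only [List.flatMap_cons, List.foldl_append, List.foldl_cons, ih]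

theorem foldl_dec {β : Type} (dec : Nat → β) (f : β → Nat → β) (g : Nat → Nat → Nat)
    (h : ∀ b k, f (dec b) k = dec (g b k)) :
    ∀ (l : List Nat) (b : Nat), l.foldl f (dec b) = dec (l.foldl g b) := by
  intro l
  induction l with
  | nil => intro b; rfl
  | cons x xs ih => intro b; rw [List.foldl_cons, h]; exact ih _

-- column-major flattening as a map over the flat index k = j*rows + i
theorem flatMap_colmajor {α : Type} (rows : Nat) (hr : 0 < rows) (f : Nat → Nat → α) :
    ∀ cols, (List.range cols).flatMap (fun j => (List.range rows).map (fun i => f i j))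
      = (List.range (cols * rows)).map (fun k => f (k % rows) (k / rows)) := by
  intro cols
  induction cols with
  | zero => simp
  | succ c ih =>
    rw [List.range_succ, List.flatMap_append, ih, Nat.succ_mul, List.range_add, List.map_append]
    congr 1
    rw [List.flatMap_cons, List.flatMap_nil, List.append_nil, List.map_map]
    apply List.map_congr_left
    intro i hi
    have hi' := List.mem_range.mp hi
    have h1 : (c * rows + i) % rows = i := by
      rw [Nat.add_comm, Nat.add_mul_mod_self_right, Nat.mod_eq_of_lt hi']
    have h2 : (c * rows + i) / rows = c := by
      rw [Nat.add_comm, Nat.add_mul_div_right _ _ hr, Nat.div_eq_of_lt hi', Nat.zero_add]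
    simp only [Function.comp_apply, h1, h2]

-- the generic "kept index only grows" fold comparisons (max side)
theorem maxfold_eq (v : Nat → Int) :
    ∀ (n t b : Nat), b < t →
      (List.range' t n).foldl (fun best k => if pairGtB (v k, k) best then (v k, k) else best) (v b, b)
      = (v ((List.range' t n).foldl (fun b' k => if v k ≥ v b' then k else b') b),
         (List.range' t n).foldl (fun b' k => if v k ≥ v b' then k else b') b) := by
  intro n
  induction n with
  | zero => intro t b _; rfl
  | succ n ih =>
    intro t b hb
    rw [List.range'_succ, List.foldl_cons, List.foldl_cons]
    have hcond : pairGtB (v t, t) (v b, b) = decide (v t ≥ v b) := by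
      simp only [pairGtB]
      by_cases h : v t ≥ v b
      · simp only [h, decide_true]
        rcases lt_or_eq_of_le h with h' | h'
        · simp [h']
        · simp [h'.symm, hb]
      · simp only [h, decide_false]
        have h1 : ¬ v b < v t := fun hlt => h (le_of_lt hlt)
        have h2 : v t ≠ v b := fun he => h (le_of_eq he.symm)
        simp [h1, h2]
    rw [hcond]
    by_cases h : v t ≥ v b
    · rw [if_pos (by simp [h]), if_pos h]
      exact ih (t + 1) t (Nat.lt_succ_self t)
    · rw [if_neg (by simp [h]), if_neg h]
      exact ih (t + 1) b (Nat.lt_succ_of_lt hb)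

-- (min side)
theorem minfold_eq (v : Nat → Int) :
    ∀ (n t b : Nat), b < t →
      (List.range' t n).foldl (fun best k => if pairLtB (v k, k) best then (v k, k) else best) (v b, b)
      = (v ((List.range' t n).foldl (fun b' k => if v k < v b' then k else b') b),
         (List.range' t n).foldl (fun b' k => if v k < v b' then k else b') b) := by
  intro n
  induction n with
  | zero => intro t b _; rfl
  | succ n ih =>
    intro t b hb
    rw [List.range'_succ, List.foldl_cons, List.foldl_cons]
    have hcond : pairLtB (v t, t) (v b, b) = decide (v t < v b) := by
      simp only [pairLtB]
      by_cases h : v t < v b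
      · simp [h]
      · have h2 : ¬ (t < b) := by omega
        by_cases he : v t = v b
        · simp [he, h2]
        · simp [h, he]
    rw [hcond]
    by_cases h : v t < v b
    · rw [if_pos (by simp [h]), if_pos h]
      exact ih (t + 1) t (Nat.lt_succ_self t)
    · rw [if_neg (by simp [h]), if_neg h]
      exact ih (t + 1) b (Nat.lt_succ_of_lt hb)

-- the flat value and decode functions
def vK (mat : List (List Int)) (k : Nat) : Int := cellA mat (k % rowsOf mat) (k / rowsOf mat)
def decK (mat : List (List Int)) (k : Nat) : Nat × Nat := (k % rowsOf mat, k / rowsOf mat)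
def keyedOf (mat : List (List Int)) : List (Int × Nat) :=
  (List.range (colsOf mat)).flatMap (fun j =>
    (List.range (rowsOf mat)).map (fun i => (cellA mat i j, j * rowsOf mat + i)))
def kfMax (mat : List (List Int)) : Nat :=
  (List.range (colsOf mat * rowsOf mat)).foldl (fun b k => if vK mat k ≥ vK mat b then k else b) 0
def kfMin (mat : List (List Int)) : Nat :=
  (List.range (colsOf mat * rowsOf mat)).foldl (fun b k => if vK mat k < vK mat b then k else b) 0

-- the keyed list really is [(v k, k) for k in range(cols*rows)]
theorem keyed_eq (mat : List (List Int)) (hr : 0 < rowsOf mat) :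
    keyedOf mat = (List.range (colsOf mat * rowsOf mat)).map (fun k => (vK mat k, k)) := by
  unfold keyedOf
  rw [flatMap_colmajor (rowsOf mat) hr (fun i j => (cellA mat i j, j * rowsOf mat + i)) (colsOf mat)]
  apply List.map_congr_left
  intro k _
  have : k / rowsOf mat * rowsOf mat + k % rowsOf mat = k := Nat.div_add_mod' k (rowsOf mat)
  simp only [vK, this]

-- A's column-major scans, re-expressed over the flat index
theorem scanMax_flat (mat : List (List Int)) :
    scanMax mat = decK mat (kfMax mat) := by
  unfold kfMax
  have h1 : scanMax mat = ((List.range (colsOf mat)).flatMap (fun j =>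
      (List.range (rowsOf mat)).map (fun i => (i, j)))).foldl
      (fun q p => if cellA mat p.1 p.2 ≥ cellA mat q.1 q.2 then p else q) (0, 0) := by
    rw [foldl_flatMap']
    unfold scanMax
    simp only [List.foldl_map]
  rw [h1]
  by_cases hr : 0 < rowsOf mat
  · rw [flatMap_colmajor (rowsOf mat) hr (fun i j => (i, j)) (colsOf mat), List.foldl_map]
    have h0 : ((0 : Nat), (0 : Nat)) = decK mat 0 := by simp [decK]
    rw [h0]
    exact foldl_dec (decK mat)
      (fun q k => if cellA mat (k % rowsOf mat) (k / rowsOf mat) ≥ cellA mat q.1 q.2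
          then (k % rowsOf mat, k / rowsOf mat) else q)
      (fun b k => if vK mat k ≥ vK mat b then k else b)
      (fun b k => by
        simp only [decK, vK]
        split <;> rfl) _ 0
  · have hr0 : rowsOf mat = 0 := by omega
    have : ∀ j, (List.range (rowsOf mat)).map (fun i => ((i, j) : Nat × Nat)) = [] := by
      intro j; rw [hr0]; rfl
    simp only [this]
    simp [hr0, decK, List.flatMap]

theorem scanMin_flat (mat : List (List Int)) :
    scanMin mat = decK mat (kfMin mat) := by
  unfold kfMin
  have h1 : scanMin mat = ((List.range (colsOf mat)).flatMap (fun j =>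
      (List.range (rowsOf mat)).map (fun i => (i, j)))).foldl
      (fun q p => if cellA mat p.1 p.2 < cellA mat q.1 q.2 then p else q) (0, 0) := by
    rw [foldl_flatMap']
    unfold scanMin
    simp only [List.foldl_map]
  rw [h1]
  by_cases hr : 0 < rowsOf mat
  · rw [flatMap_colmajor (rowsOf mat) hr (fun i j => (i, j)) (colsOf mat), List.foldl_map]
    have h0 : ((0 : Nat), (0 : Nat)) = decK mat 0 := by simp [decK]
    rw [h0]
    exact foldl_dec (decK mat)
      (fun q k => if cellA mat (k % rowsOf mat) (k / rowsOf mat) < cellA mat q.1 q.2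
          then (k % rowsOf mat, k / rowsOf mat) else q)
      (fun b k => if vK mat k < vK mat b then k else b)
      (fun b k => by
        simp only [decK, vK]
        split <;> rfl) _ 0
  · have hr0 : rowsOf mat = 0 := by omega
    have : ∀ j, (List.range (rowsOf mat)).map (fun i => ((i, j) : Nat × Nat)) = [] := by
      intro j; rw [hr0]; rfl
    simp only [this]
    simp [hr0, decK, List.flatMap]

-- peel the first flat index off range N (N > 0)
theorem range_peel (N : Nat) (hN : 0 < N) : List.range N = 0 :: List.range' 1 (N - 1) := by
  obtain ⟨n, rfl⟩ : ∃ n, N = n + 1 := ⟨N - 1, by omega⟩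
  rw [List.range_eq_range', List.range'_succ]
  simp

-- pyMaxB over the keyed list finds A's flat max index
theorem pyMaxB_keyed (mat : List (List Int)) (hr : 0 < rowsOf mat) (hc : 0 < colsOf mat) :
    (pyMaxB (keyedOf mat)).2 = kfMax mat := by
  have hN : 0 < colsOf mat * rowsOf mat := Nat.mul_pos hc hr
  unfold kfMax
  rw [keyed_eq mat hr, range_peel _ hN, List.map_cons]
  simp only [pyMaxB]
  rw [List.foldl_map, List.foldl_cons]
  have h00 : (if vK mat 0 ≥ vK mat 0 then 0 else 0) = 0 := by simp
  rw [h00]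
  exact congrArg Prod.snd (maxfold_eq (vK mat) (colsOf mat * rowsOf mat - 1) 1 0 Nat.one_pos)

theorem pyMinB_keyed (mat : List (List Int)) (hr : 0 < rowsOf mat) (hc : 0 < colsOf mat) :
    (pyMinB (keyedOf mat)).2 = kfMin mat := by
  have hN : 0 < colsOf mat * rowsOf mat := Nat.mul_pos hc hr
  unfold kfMin
  rw [keyed_eq mat hr, range_peel _ hN, List.map_cons]
  simp only [pyMinB]
  rw [List.foldl_map, List.foldl_cons]
  have h00 : (if vK mat 0 < vK mat 0 then 0 else 0) = 0 := by simp
  rw [h00]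
  exact congrArg Prod.snd (minfold_eq (vK mat) (colsOf mat * rowsOf mat - 1) 1 0 Nat.one_pos)

-- ---- B-side lemmas: the swap/transpose construction equals the remapped matrix ----

theorem length_swap2 (m : List (List Int)) (a b : Nat) : (swap2 m a b).length = m.length := by
  simp [swap2]

theorem getD_swap2 (m : List (List Int)) (a b : Nat) (ha : a < m.length) (hb : b < m.length)
    (r : Nat) : (swap2 m a b).getD r [] = m.getD (rswap a b r) [] := by
  unfold swap2 rswap
  rw [getD_set' _ _ _ (by simpa using hb), getD_set' _ _ _ ha]
  split_ifs <;> rfl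

theorem getD_map_lt {α β : Type} (f : α → β) (l : List α) (i : Nat) (hi : i < l.length)
    (d : β) (d' : α) : (l.map f).getD i d = f (l.getD i d') := by
  rw [List.getD_eq_getElem _ _ (by simpa using hi), List.getD_eq_getElem _ _ hi, List.getElem_map]

theorem getD_take (l : List Int) (n c : Nat) (hc : c < n) (d : Int) :
    (l.take n).getD c d = l.getD c d := by
  rw [List.getD_eq_getElem?_getD, List.getD_eq_getElem?_getD, List.getElem?_take, if_pos hc]

-- B's whole construction, characterized
theorem es62_alt_eq_remap (mat : List (List Int)) (hr : 0 < rowsOf mat) (hc : 0 < colsOf mat) :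
    es62_alt mat = remapM mat (scanMax mat) (scanMin mat) := by
  obtain ⟨hi1, hj1, hi2, hj2⟩ := scan_bounds mat hr hc
  have hcb : cellB = cellA := rfl
  have hkey : (List.range ((mat.getD 0 []).length)).flatMap (fun j =>
      (List.range mat.length).map (fun i => (cellA mat i j, j * mat.length + i))) = keyedOf mat := rfl
  have e1 : kfMax mat % mat.length = (scanMax mat).1 := by
    have h := congrArg Prod.fst (scanMax_flat mat)
    simpa [decK, rowsOf] using h.symm
  have e2 : kfMax mat / mat.length = (scanMax mat).2 := by
    have h := congrArg Prod.snd (scanMax_flat mat)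
    simpa [decK, rowsOf] using h.symm
  have e3 : kfMin mat % mat.length = (scanMin mat).1 := by
    have h := congrArg Prod.fst (scanMin_flat mat)
    simpa [decK, rowsOf] using h.symm
  have e4 : kfMin mat / mat.length = (scanMin mat).2 := by
    have h := congrArg Prod.snd (scanMin_flat mat)
    simpa [decK, rowsOf] using h.symm
  simp only [es62_alt, hcb]
  rw [hkey, pyMaxB_keyed mat hr hc, pyMinB_keyed mat hr hc, e1, e2, e3, e4]
  unfold remapM rowsOf colsOf
  -- abbreviations for the four indices and the staged lists
  have hi1' : (scanMax mat).1 < mat.length := hi1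
  have hi2' : (scanMin mat).1 < mat.length := hi2
  have hj1' : (scanMax mat).2 < (mat.getD 0 []).length := hj1
  have hj2' : (scanMin mat).2 < (mat.getD 0 []).length := hj2
  apply List.map_congr_left
  intro i hi'
  have hi : i < mat.length := List.mem_range.mp hi'
  -- name the staged lists
  set M : List (List Int) := mat.map (fun row => List.take ((mat.getD 0 []).length) row) with hM
  set M2 : List (List Int) := swap2 M (scanMax mat).1 (scanMin mat).1 with hM2
  set T : List (List Int) := (List.range ((mat.getD 0 []).length)).map
      (fun j => M2.map (fun row => row.getD j 0)) with hT
  set T2 : List (List Int) := swap2 T (scanMax mat).2 (scanMin mat).2 with hT2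
  have hMlen : M.length = mat.length := by rw [hM]; simp
  have hM2len : M2.length = mat.length := by rw [hM2, length_swap2, hMlen]
  have hTlen : T.length = (mat.getD 0 []).length := by rw [hT]; simp
  have hT2len : T2.length = (mat.getD 0 []).length := by rw [hT2, length_swap2, hTlen]
  apply List.ext_getElem
  · rw [List.length_map, hT2len]; simp
  · intro j hJ hJ'
    have hj : j < (mat.getD 0 []).length := by rw [List.length_map, hT2len] at hJ; exact hJ
    rw [List.getElem_map]
    conv_rhs => rw [List.getElem_map, List.getElem_range]
    rw [← List.getD_eq_getElem T2 ([] : List Int) (by rw [hT2len]; exact hj)]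
    rw [hT2, getD_swap2 T _ _ (by rw [hTlen]; exact hj1') (by rw [hTlen]; exact hj2') j]
    have hclt : rswap (scanMax mat).2 (scanMin mat).2 j < (mat.getD 0 []).length :=
      rswap_lt _ _ _ _ hj1' hj2' hj
    have hTc : T.getD (rswap (scanMax mat).2 (scanMin mat).2 j) []
        = M2.map (fun row => row.getD (rswap (scanMax mat).2 (scanMin mat).2 j) 0) := by
      rw [hT, getD_map_lt (fun j' => M2.map (fun row => row.getD j' 0))
        (List.range ((mat.getD 0 []).length)) _ (by simpa using hclt) ([] : List Int) 0]
      rw [List.getD_eq_getElem _ _ (by simpa using hclt), List.getElem_range]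
    rw [hTc]
    rw [getD_map_lt (fun row => row.getD (rswap (scanMax mat).2 (scanMin mat).2 j) 0) M2 i
      (by rw [hM2len]; exact hi) (0 : Int) ([] : List Int)]
    rw [hM2, getD_swap2 M _ _ (by rw [hMlen]; exact hi1') (by rw [hMlen]; exact hi2') i]
    have hrlt : rswap (scanMax mat).1 (scanMin mat).1 i < mat.length :=
      rswap_lt _ _ _ _ hi1' hi2' hi
    have hMr : M.getD (rswap (scanMax mat).1 (scanMin mat).1 i) []
        = (mat.getD (rswap (scanMax mat).1 (scanMin mat).1 i) []).take ((mat.getD 0 []).length) := by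
      rw [hM, getD_map_lt (fun row => List.take ((mat.getD 0 []).length) row) mat _ hrlt
        ([] : List Int) ([] : List Int)]
    rw [hMr, getD_take _ _ _ hclt]
    rfl

-- ===== VERDICT (by name: the statement is the Claim_ definition above) =====
theorem es62_spec : Claim_equal_es62 := by
  intro matrix _ hpre
  unfold Spec_es62
  obtain ⟨hrpos, hcpos, _⟩ := pre_facts matrix hpre
  rw [es62_eq_remap matrix hrpos hcpos, es62_alt_eq_remap matrix hrpos hcpos]
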